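-- pv_equiv track=rewrite | github.com/jadaunaryansingh/Legally2.0_UsingBNS | admin-backend/create_bns_json.py | get_category_summary
-- ===== SOURCE A (Python) =====
-- from typing import Dict, List, Optional
--
-- def get_category_summary(sections: Dict) -> Dict:
--     """Create category summary"""
--     categories = {}
--     for section_num, section_info in sections.items():
--         category = section_info.get('category', 'Miscellaneous')
--         if category not in categories:
--             categories[category] = []
--         categories[category].append(section_num)
--
--     return {cat: sorted(secs) for cat, secs in categories.items()}
-- ===== SOURCE B (Python) =====
-- def get_category_summary(sections):
--     """Create category summary: seed categories in first-appearance order,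
--     then one global sort of section numbers and a single grouping pass
--     (no per-category sort)."""
--     categories = {}
--     for section_info in sections.values():
--         categories.setdefault(section_info.get('category', 'Miscellaneous'), [])
--     for section_num in sorted(sections):
--         categories[sections[section_num].get('category', 'Miscellaneous')].append(section_num)
--     return categories
-- ===== Notes on version B (the rewrite author's own statement) =====
-- stated objective: alternative
-- what changed: A groups section numbers per category in insertion order and then sorts each group's list; B instead sorts the section numbers once globally and does a single grouping pass that appends in already-sorted order (category order preserved by a seeding pass), so no per-group sort happens. Pre_ only excludes association-list encodings with duplicate keys, which a real Python dict cannot contain.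
import Mathlib
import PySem

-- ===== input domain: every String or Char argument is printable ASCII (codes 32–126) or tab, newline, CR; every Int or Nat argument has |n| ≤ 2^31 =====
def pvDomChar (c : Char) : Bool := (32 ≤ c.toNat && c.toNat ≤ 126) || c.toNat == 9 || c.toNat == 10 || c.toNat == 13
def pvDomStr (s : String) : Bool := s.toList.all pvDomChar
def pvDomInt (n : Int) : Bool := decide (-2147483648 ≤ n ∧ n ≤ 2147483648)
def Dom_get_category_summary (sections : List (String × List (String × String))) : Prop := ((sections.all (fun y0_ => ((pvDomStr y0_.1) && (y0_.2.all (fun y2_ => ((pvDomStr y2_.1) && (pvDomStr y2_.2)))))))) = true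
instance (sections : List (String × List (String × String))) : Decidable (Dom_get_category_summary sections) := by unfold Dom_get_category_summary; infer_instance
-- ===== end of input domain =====

-- ===== PORT A =====
-- B changes the decomposition: one global sort plus a single grouping pass instead of group-then-sort-each; same cost.
-- shared helper: section_info.get('category', 'Miscellaneous')
def pvCatOf (info : List (String × String)) : String :=
  (PySem.Dict.mk info).getD "category" "Miscellaneous"

def get_category_summary (sections : List (String × List (String × String))) : List (String × List String) :=
  let categories : PySem.Dict String (List String) :=
    sections.foldl (fun cats kv =>
      let category := pvCatOf kv.2
      let cats' := if cats.contains category then cats else cats.insert category []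
      cats'.modify category [] (fun l => l ++ [kv.1])) PySem.Dict.empty
  categories.items.map (fun p => (p.1, PySem.List.sorted p.2 (fun x => x) false))

-- ===== PORT B =====
def get_category_summary_alt (sections : List (String × List (String × String))) : List (String × List String) :=
  let order : PySem.Dict String (List String) :=
    sections.foldl (fun d kv => d.setdefault (pvCatOf kv.2) []) PySem.Dict.empty
  let nums := PySem.List.sorted (sections.map Prod.fst) (fun x => x) false
  let order2 := nums.foldl (fun d k =>
      d.modify (pvCatOf ((PySem.Dict.mk sections).getD k [])) [] (fun l => l ++ [k])) order
  order2.items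

-- ===== PRECONDITION & SPEC =====
-- Pre_ excludes association-list encodings with duplicate keys (outer or inner): a real Python
-- dict cannot contain them, and the encoding's first-match lookup there is an artefact.
def Pre_get_category_summary (sections : List (String × List (String × String))) : Prop :=
  (sections.map Prod.fst).Nodup ∧ ∀ kv ∈ sections, (kv.2.map Prod.fst).Nodup
instance (sections : List (String × List (String × String))) : Decidable (Pre_get_category_summary sections) := by
  unfold Pre_get_category_summary; infer_instance

def pvWitness_get_category_summary : (List (String × List (String × String))) :=
  [("102", [("category", "Theft")]), ("7", [("title", "x")])]

def Spec_get_category_summary (sections : List (String × List (String × String))) (out : List (String × List String)) : Prop := out = get_category_summary_alt sections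
instance (sections : List (String × List (String × String))) (out : List (String × List String)) : Decidable (Spec_get_category_summary sections out) := by unfold Spec_get_category_summary; infer_instance

-- ===== CLAIM (what is proved, stated in full; the proofs are below) =====
def Claim_equal_get_category_summary : Prop := ∀ (sections : List (String × List (String × String))), Dom_get_category_summary sections → Pre_get_category_summary sections → Spec_get_category_summary sections (get_category_summary sections)

-- ===== LEMMAS AND PROOFS =====

-- A's loop body (seed-if-missing, then append) is one modify.
theorem pv_stepA (d : PySem.Dict String (List String)) (c : String) (num : String) :
    (if d.contains c then d else d.insert c []).modify c [] (fun l => l ++ [num])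
      = d.modify c [] (fun l => l ++ [num]) := by
  by_cases h : d.contains c = true
  · simp [h]
  · have hc : d.contains c = false := Bool.eq_false_iff.mpr h
    simp [hc, PySem.Dict.modify, PySem.Dict.insert_insert_self,
      PySem.Dict.getD_insert_self, PySem.Dict.getD_of_not_contains d ([] : List String) hc]

-- looking a key of sections up in dict(sections) gives its info (outer keys Nodup)
theorem pv_lookup (sections : List (String × List (String × String)))
    (hnd : (sections.map Prod.fst).Nodup)
    {kv : String × List (String × String)} (hm : kv ∈ sections) :
    (PySem.Dict.mk sections).getD kv.1 [] = kv.2 := by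
  exact PySem.Dict.getD_of_mem_items (d := PySem.Dict.mk sections) (k := kv.1) (v := kv.2)
    (by exact hm) (by simpa [PySem.Dict.keys] using hnd) []

-- every value stored by the seeding pass is []
theorem pv_seed_getD (sections : List (String × List (String × String)))
    (d : PySem.Dict String (List String)) (h : ∀ c, d.getD c [] = ([] : List String)) (c : String) :
    (sections.foldl (fun d kv => d.setdefault (pvCatOf kv.2) []) d).getD c [] = ([] : List String) := by
  induction sections generalizing d with
  | nil => exact h c
  | cons kv rest ih =>
      refine ih _ (fun c' => ?_)
      by_cases hc : c' = pvCatOf kv.2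
      · subst hc
        simp [PySem.Dict.getD_setdefault_self, h]
      · rw [PySem.Dict.getD_eq_get?_getD, PySem.Dict.get?_setdefault_of_ne _ _ hc,
          ← PySem.Dict.getD_eq_get?_getD, h]

-- keys of the seeding pass = first-appearance-ordered distinct categories
theorem pv_seed_keys (sections : List (String × List (String × String)))
    (d : PySem.Dict String (List String)) :
    (sections.foldl (fun d kv => d.setdefault (pvCatOf kv.2) []) d).keys
      = PySem.Set.update d.keys (sections.map (fun kv => pvCatOf kv.2)) := by
  induction sections generalizing d with
  | nil => simp [PySem.Set.update]
  | cons kv rest ih =>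
      rw [List.foldl_cons, ih, List.map_cons, PySem.Set.update_cons]
      congr 1
      rw [PySem.Dict.keys_setdefault, PySem.Set.add_eq_ite]
      by_cases h : pvCatOf kv.2 ∈ d.keys
      · simp [h, (PySem.Dict.contains_iff_mem_keys _ _).mpr h]
      · have hc : d.contains (pvCatOf kv.2) = false :=
          Bool.eq_false_iff.mpr (fun hh => h ((PySem.Dict.contains_iff_mem_keys _ _).mp hh))
        simp [h, hc]

-- the central per-category fact: sorting the group = filtering the globally sorted keys
theorem pv_sorted_filter (sections : List (String × List (String × String)))
    (hnd : (sections.map Prod.fst).Nodup) (c : String) :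
    PySem.List.sorted ((sections.filter (fun kv => pvCatOf kv.2 == c)).map Prod.fst) (fun x => x) false
      = (PySem.List.sorted (sections.map Prod.fst) (fun x => x) false).filter
          (fun k => pvCatOf ((PySem.Dict.mk sections).getD k []) == c) := by
  have hperm : (PySem.List.sorted (sections.map Prod.fst) (fun x => x) false).Perm
      (sections.map Prod.fst) := PySem.List.sorted_perm _ _ _
  apply PySem.List.sorted_eq_of_perm_of_pairwise_lt
  · refine (hperm.filter _).trans ?_
    rw [List.filter_map]
    have hfc : sections.filter
          ((fun k => pvCatOf ((PySem.Dict.mk sections).getD k []) == c) ∘ Prod.fst)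
        = sections.filter (fun kv => pvCatOf kv.2 == c) := by
      refine List.filter_congr (fun kv hkv => ?_)
      simp [Function.comp, pv_lookup sections hnd hkv]
    rw [hfc]
  · have h1 : (PySem.List.sorted (sections.map Prod.fst) (fun x => x) false).Pairwise (· ≤ ·) :=
      PySem.List.sorted_pairwise (sections.map Prod.fst) (fun x => x)
    have h2 : (PySem.List.sorted (sections.map Prod.fst) (fun x => x) false).Nodup :=
      hperm.symm.nodup hnd
    exact ((h1.and h2).imp (fun h => lt_of_le_of_ne h.1 h.2)).filter _

-- A's dict: keys in first-appearance order of categories, value = keys of the group in input order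
theorem pv_A_fold (sections : List (String × List (String × String))) :
    (sections.foldl (fun cats kv =>
        let category := pvCatOf kv.2
        let cats' := if cats.contains category then cats else cats.insert category []
        cats'.modify category [] (fun l => l ++ [kv.1])) PySem.Dict.empty)
      = sections.foldl (fun d kv => d.modify (pvCatOf kv.2) [] (fun l => l ++ [kv.1]))
          PySem.Dict.empty :=
  PySem.List.foldl_congr_mem _ _ _ _ (fun acc kv _ => pv_stepA acc (pvCatOf kv.2) kv.1)

-- ===== VERDICT (by name: the statement is the Claim_ definition above) =====
theorem get_category_summary_spec : Claim_equal_get_category_summary := by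
  intro sections _hdom hpre
  obtain ⟨hnd, _hinner⟩ := hpre
  show get_category_summary sections = get_category_summary_alt sections
  unfold get_category_summary get_category_summary_alt
  dsimp only
  rw [pv_A_fold]
  set key2 : String → String := fun k => pvCatOf ((PySem.Dict.mk sections).getD k []) with hkey2
  set nums := PySem.List.sorted (sections.map Prod.fst) (fun x => x) false with hnums
  set dA := sections.foldl (fun d kv => d.modify (pvCatOf kv.2) [] (fun l => l ++ [kv.1]))
      PySem.Dict.empty with hdA
  set dS := sections.foldl (fun d kv => d.setdefault (pvCatOf kv.2) []) PySem.Dict.empty with hdS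
  set dB := nums.foldl (fun d k => d.modify (key2 k) [] (fun l => l ++ [k])) dS with hdB
  -- keys of the three dicts
  have hkA : dA.keys = PySem.Set.ofList (sections.map (fun kv => pvCatOf kv.2)) := by
    rw [hdA, PySem.Dict.keys_foldl_modify_key sections (fun kv => pvCatOf kv.2) []
      (fun _ kv => fun l => l ++ [kv.1]) PySem.Dict.empty]
    exact PySem.Set.update_empty _
  have hkS : dS.keys = PySem.Set.ofList (sections.map (fun kv => pvCatOf kv.2)) := by
    rw [hdS, pv_seed_keys]
    exact PySem.Set.update_empty _
  have hmemk : ∀ k ∈ nums, key2 k ∈ dS.keys := by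
    intro k hk
    rw [hnums, PySem.List.mem_sorted] at hk
    obtain ⟨kv, hkv, rfl⟩ := List.mem_map.mp hk
    rw [hkS, hkey2]
    simp only [pv_lookup sections hnd hkv]
    exact (PySem.Set.mem_ofList _ _).mpr (List.mem_map.mpr ⟨kv, hkv, rfl⟩)
  have hkB : dB.keys = dS.keys := by
    rw [hdB, PySem.Dict.keys_foldl_modify_key nums key2 [] (fun _ k => fun l => l ++ [k]) dS,
      PySem.Set.update_eq_append_filter]
    have hnil : (PySem.Set.ofList (nums.map key2)).filter
        (fun y => !(PySem.Set.contains dS.keys y)) = [] := by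
      refine List.filter_eq_nil_iff.mpr (fun y hy => ?_)
      have : y ∈ nums.map key2 := (PySem.Set.mem_ofList _ _).mp hy
      obtain ⟨k, hk, rfl⟩ := List.mem_map.mp this
      simp [hmemk k hk]
    rw [hnil, List.append_nil]
  -- values
  have hA_getD : ∀ c, dA.getD c []
      = (sections.filter (fun kv => pvCatOf kv.2 == c)).map Prod.fst := by
    intro c
    rw [hdA, ← List.foldl_map (f := fun kv : String × List (String × String) => (pvCatOf kv.2, kv.1))
      (g := fun d p => PySem.Dict.modify d p.1 [] (fun l => l ++ [p.2])),
      PySem.Dict.getD_foldl_modify_append]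
    simp [List.filter_map, List.map_map, Function.comp_def]
  have hS_getD : ∀ c, dS.getD c [] = ([] : List String) := by
    intro c
    rw [hdS]
    exact pv_seed_getD sections PySem.Dict.empty (fun c' => by simp) c
  have hB_getD : ∀ c, dB.getD c [] = nums.filter (fun k => key2 k == c) := by
    intro c
    rw [hdB, ← List.foldl_map (f := fun k : String => (key2 k, k))
      (g := fun d p => PySem.Dict.modify d p.1 [] (fun l => l ++ [p.2])),
      PySem.Dict.getD_foldl_modify_append, hS_getD]
    simp [List.filter_map, List.map_map, Function.comp_def]
  -- nodup keys
  have hndS : dS.keys.Nodup := by rw [hkS]; exact PySem.Set.nodup_ofList _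
  have hndA : dA.keys.Nodup := by rw [hkA]; exact PySem.Set.nodup_ofList _
  have hndB : dB.keys.Nodup := by rw [hkB]; exact hndS
  -- assemble via items = map over keys
  rw [PySem.Dict.items_eq_map_keys dA hndA [], PySem.Dict.items_eq_map_keys dB hndB [],
    List.map_map, hkA, hkB, hkS]
  refine List.map_congr_left (fun c _ => ?_)
  simp only [Function.comp, hA_getD, hB_getD]
  exact congrArg (fun l => (c, l)) (pv_sorted_filter sections hnd c)
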